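-- pv_equiv track=rewrite | github.com/YannikMarkworth/youtube-processor | review_inbox.py | find_video_by_title
-- ===== SOURCE A (Python) =====
-- def find_video_by_title(title, inbox_videos):
--     """Matches a title to a video in the inbox list."""
--     title_lower = title.lower().strip()
--     for v in inbox_videos:
--         if v['title'].lower().strip() == title_lower:
--             return v
--     for v in inbox_videos:
--         if title_lower in v['title'].lower() or v['title'].lower() in title_lower:
--             return v
--     return None
-- ===== SOURCE B (Python) =====
-- def find_video_by_title(title, inbox_videos):
--     """Single pass: return exact match immediately, else remember first substring match."""
--     title_lower = title.lower().strip()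
--     fallback = None
--     for v in inbox_videos:
--         vl = v['title'].lower()
--         if vl.strip() == title_lower:
--             return v
--         if fallback is None and (title_lower in vl or vl in title_lower):
--             fallback = v
--     return fallback
-- ===== Notes on version B (the rewrite author's own statement) =====
-- stated objective: alternative
-- what changed: Replaces A's two full scans with a single pass that returns on an exact match and records the first substring match as a fallback.
import Mathlib
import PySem

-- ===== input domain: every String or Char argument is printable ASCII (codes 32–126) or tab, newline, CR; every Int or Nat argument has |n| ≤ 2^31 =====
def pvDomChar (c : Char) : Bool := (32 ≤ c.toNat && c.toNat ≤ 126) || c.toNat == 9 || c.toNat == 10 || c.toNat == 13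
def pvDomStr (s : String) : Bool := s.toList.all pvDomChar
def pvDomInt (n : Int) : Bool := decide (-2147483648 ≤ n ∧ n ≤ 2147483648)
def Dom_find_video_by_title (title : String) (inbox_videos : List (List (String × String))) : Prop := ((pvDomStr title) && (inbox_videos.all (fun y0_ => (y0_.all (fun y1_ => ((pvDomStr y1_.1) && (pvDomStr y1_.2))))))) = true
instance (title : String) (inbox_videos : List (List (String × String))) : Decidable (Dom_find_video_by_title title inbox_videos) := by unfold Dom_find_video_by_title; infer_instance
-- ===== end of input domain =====

-- B fuses A's two scans into one pass (exact match returns immediately, first substring match is kept as fallback); same return value.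
-- On dicts lacking a 'title' key both Pythons raise KeyError; Pre_ excludes those inputs.


-- ===== PORT A =====
-- v['title']: first-match lookup; Pre_ guarantees the key exists, so getD "" is exact on admitted inputs
def fvbtTitleA (v : List (String × String)) : String :=
  ((PySem.Dict.mk v).get? "title").getD ""

-- first for-loop of A: exact match on lower().strip()
def fvbtLoop1 (tl : String) : List (List (String × String)) → Option (List (String × String))
  | [] => none
  | v :: rest =>
    if PySem.Str.strip (PySem.Str.lower (fvbtTitleA v)) == tl then some v
    else fvbtLoop1 tl rest

-- second for-loop of A: mutual substring test on lower()
def fvbtLoop2 (tl : String) : List (List (String × String)) → Option (List (String × String))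
  | [] => none
  | v :: rest =>
    if PySem.Str.isIn tl (PySem.Str.lower (fvbtTitleA v))
        || PySem.Str.isIn (PySem.Str.lower (fvbtTitleA v)) tl then some v
    else fvbtLoop2 tl rest

def find_video_by_title (title : String) (inbox_videos : List (List (String × String))) : Option (List (String × String)) :=
  let title_lower := PySem.Str.strip (PySem.Str.lower title)
  match fvbtLoop1 title_lower inbox_videos with
  | some v => some v
  | none => fvbtLoop2 title_lower inbox_videos

-- ===== PORT B =====
def fvbtTitleB (v : List (String × String)) : String :=
  ((PySem.Dict.mk v).get? "title").getD ""

-- B's single pass with a fallback accumulator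
def fvbtScan (tl : String) (fb : Option (List (String × String))) :
    List (List (String × String)) → Option (List (String × String))
  | [] => fb
  | v :: rest =>
    let vl := PySem.Str.lower (fvbtTitleB v)
    if PySem.Str.strip vl == tl then some v
    else
      fvbtScan tl
        (if fb.isNone && (PySem.Str.isIn tl vl || PySem.Str.isIn vl tl) then some v else fb)
        rest

def find_video_by_title_alt (title : String) (inbox_videos : List (List (String × String))) : Option (List (String × String)) :=
  fvbtScan (PySem.Str.strip (PySem.Str.lower title)) none inbox_videos

-- ===== PRECONDITION & SPEC =====
-- Pre_ excludes exactly the inputs on which A raises KeyError: a video dict lacking the 'title' key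
-- that is scanned before any exact match (a missing key after an exact match is never read).
def Pre_find_video_by_title (title : String) (inbox_videos : List (List (String × String))) : Prop :=
  ∀ v ∈ inbox_videos.takeWhile (fun v =>
      match (PySem.Dict.mk v).get? "title" with
      | some t => !(PySem.Str.strip (PySem.Str.lower t) == PySem.Str.strip (PySem.Str.lower title))
      | none => true),
    (PySem.Dict.mk v).contains "title" = true
instance (title : String) (inbox_videos : List (List (String × String))) : Decidable (Pre_find_video_by_title title inbox_videos) := by unfold Pre_find_video_by_title; infer_instance

def pvWitness_find_video_by_title : String × (List (List (String × String))) :=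
  ("Foo", [[("title", "foo bar")], [("title", "Baz")]])

def Spec_find_video_by_title (title : String) (inbox_videos : List (List (String × String))) (out : Option (List (String × String))) : Prop := out = find_video_by_title_alt title inbox_videos
instance (title : String) (inbox_videos : List (List (String × String))) (out : Option (List (String × String))) : Decidable (Spec_find_video_by_title title inbox_videos out) := by unfold Spec_find_video_by_title; infer_instance

-- ===== CLAIM (what is proved, stated in full; the proofs are below) =====
def Claim_equal_find_video_by_title : Prop := ∀ (title : String) (inbox_videos : List (List (String × String))), Dom_find_video_by_title title inbox_videos → Pre_find_video_by_title title inbox_videos → Spec_find_video_by_title title inbox_videos (find_video_by_title title inbox_videos)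

-- ===== LEMMAS AND PROOFS =====

-- B's scan is A's first loop, or-else the fallback, or-else A's second loop.
theorem fvbtScan_eq (tl : String) (l : List (List (String × String)))
    (fb : Option (List (String × String))) :
    fvbtScan tl fb l = (fvbtLoop1 tl l).or (fb.or (fvbtLoop2 tl l)) := by
  induction l generalizing fb with
  | nil => simp [fvbtScan, fvbtLoop1, fvbtLoop2]
  | cons v rest ih =>
    simp only [fvbtScan, fvbtLoop1, fvbtLoop2, fvbtTitleA, fvbtTitleB]
    split
    · rfl
    · rw [ih]
      cases fb with
      | some f => simp
      | none => simp only [Option.isNone_none, Bool.true_and]; split <;> simp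

-- ===== VERDICT (by name: the statement is the Claim_ definition above) =====
theorem find_video_by_title_spec : Claim_equal_find_video_by_title := by
  intro title inbox _ _
  unfold Spec_find_video_by_title find_video_by_title find_video_by_title_alt
  rw [fvbtScan_eq]
  cases h : fvbtLoop1 (PySem.Str.strip (PySem.Str.lower title)) inbox <;> simp [h, Option.or]
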